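-- pv_equiv track=rewrite | github.com/zyy20009619/cluster | algos/CommonFunction.py | generateTheGroundTruth
-- ===== SOURCE A (Python) =====
-- def generateTheGroundTruth(variable, clusterNum):
--     trueResult = [[] for i in range(clusterNum)]
--     index = -1
--     for variableIndex in range(len(variable)):
--         if variable[variableIndex] == 'module-info':
--             index += 1
--         if variable[variableIndex].startswith('org.aion.') and JudgeToFile(variable[variableIndex]):
--             trueResult[index].append(variable[variableIndex])
--     return trueResult
--
-- def JudgeToFile(filename):
--     haveHigh = False
--     for fileIndex in range(len(filename)):
--         if 'A' <= filename[fileIndex] <= 'Z':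
--             for extendIndex in range(fileIndex + 1, len(filename)):
--                 if filename[extendIndex] == '.':
--                     haveHigh = True
--                     break
--     return haveHigh
-- ===== SOURCE B (Python) =====
-- def generateTheGroundTruth(variable, clusterNum):
--     buckets = {}
--     marks = 0
--     for v in variable:
--         if v == 'module-info':
--             marks += 1
--         if marks > 0 and v.startswith('org.aion.') and _isJavaFile(v):
--             buckets.setdefault(marks - 1, []).append(v)
--     return [buckets.get(k, []) for k in range(clusterNum)]
--
-- def _isJavaFile(name):
--     seenUpper = False
--     for c in name:
--         if c == '.' and seenUpper:
--             return True
--         if 'A' <= c <= 'Z':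
--             seenUpper = True
--     return False
-- ===== Notes on version B (the rewrite author's own statement) =====
-- stated objective: faster
-- what changed: B groups qualifying entries into a dict of buckets keyed by the running 'module-info' count and assembles the result with a comprehension, replacing A's preallocated result list mutated via (possibly negative) indexing, and replaces A's nested O(L^2) uppercase/dot index scan per entry with a single O(L) pass carrying a seen-uppercase flag; Pre_ excludes only the inputs on which A raises IndexError.
-- intended difference: On inputs with clusterNum >= 1 where some qualifying org.aion entry occurs before the first 'module-info' marker, A appends that entry to the LAST group via Python's accidental -1 negative-index wraparound, while B drops entries that precede any marker, which is the intended grouping (an entry before any module belongs to no module). — e.g. on generateTheGroundTruth(["org.aion.B.x"], 1): A returns [["org.aion.B.x"]], B returns [[]]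
import Mathlib
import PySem

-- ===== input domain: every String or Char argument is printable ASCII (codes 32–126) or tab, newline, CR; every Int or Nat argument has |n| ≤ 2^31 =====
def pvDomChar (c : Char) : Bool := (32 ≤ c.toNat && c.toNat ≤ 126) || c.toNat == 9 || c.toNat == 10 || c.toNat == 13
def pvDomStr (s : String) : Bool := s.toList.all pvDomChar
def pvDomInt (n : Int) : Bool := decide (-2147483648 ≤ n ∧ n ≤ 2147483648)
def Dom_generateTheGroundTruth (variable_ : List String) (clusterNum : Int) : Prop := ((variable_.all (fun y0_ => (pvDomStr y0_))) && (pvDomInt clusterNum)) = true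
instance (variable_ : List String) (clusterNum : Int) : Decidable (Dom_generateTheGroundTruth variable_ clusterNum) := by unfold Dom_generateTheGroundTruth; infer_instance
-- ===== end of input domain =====

-- B buckets qualifying entries in a dict keyed by the running 'module-info' count and assembles the
-- result with a comprehension, with a single-pass seen-uppercase judge (alternative decomposition);
-- B intentionally drops entries preceding any marker, which A routes to the last group via -1 indexing (see D_).

-- ===== PORT A =====
-- inner loop of JudgeToFile: for extendIndex in range(fileIndex+1, len(filename)): if '.': haveHigh = True; break
def judgeInnerLoop (cs : List Char) (extendIndex : Nat) (haveHigh : Bool) : Bool :=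
  if h : extendIndex < cs.length then
    if cs[extendIndex] = '.' then true
    else judgeInnerLoop cs (extendIndex + 1) haveHigh
  else haveHigh
termination_by cs.length - extendIndex

-- outer loop of JudgeToFile
def judgeOuterLoop (cs : List Char) (fileIndex : Nat) (haveHigh : Bool) : Bool :=
  if h : fileIndex < cs.length then
    judgeOuterLoop cs (fileIndex + 1)
      (if ('A' ≤ cs[fileIndex] && cs[fileIndex] ≤ 'Z') then judgeInnerLoop cs (fileIndex + 1) haveHigh
       else haveHigh)
  else haveHigh
termination_by cs.length - fileIndex

def JudgeToFile (filename : String) : Bool := judgeOuterLoop filename.toList 0 false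

-- body of A's main for-loop (state = (trueResult, index))
def mainStepA (st : List (List String) × Int) (v : String) : List (List String) × Int :=
  let index := if v = "module-info" then st.2 + 1 else st.2
  let res :=
    if PySem.Str.startswith v "org.aion." && JudgeToFile v then
      -- trueResult[index].append(v)  (Python negative-index semantics; out of range = IndexError, excluded by Pre_)
      PySem.List.pySetD st.1 index (PySem.List.pyGetD st.1 index [] ++ [v])
    else st.1
  (res, index)

def generateTheGroundTruth (variable_ : List String) (clusterNum : Int) : List (List String) :=
  (variable_.foldl mainStepA (List.replicate clusterNum.toNat ([] : List String), -1)).1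

-- ===== PORT B =====
-- _isJavaFile: single pass with a seen-uppercase flag
def isJavaFileLoop (cs : List Char) (seenUpper : Bool) : Bool :=
  match cs with
  | [] => false
  | c :: rest =>
    if c = '.' && seenUpper then true
    else isJavaFileLoop rest (seenUpper || ('A' ≤ c && c ≤ 'Z'))

def isJavaFile (v : String) : Bool := isJavaFileLoop v.toList false

-- body of B's bucketing loop (state = (marks, buckets))
def mainStepB (st : Int × PySem.Dict Int (List String)) (v : String) : Int × PySem.Dict Int (List String) :=
  let marks := if v = "module-info" then st.1 + 1 else st.1
  let buckets :=
    if decide (0 < marks) && PySem.Str.startswith v "org.aion." && isJavaFile v then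
      -- buckets.setdefault(marks - 1, []).append(v)
      st.2.modify (marks - 1) [] (· ++ [v])
    else st.2
  (marks, buckets)

def generateTheGroundTruth_alt (variable_ : List String) (clusterNum : Int) : List (List String) :=
  let st := variable_.foldl mainStepB (0, PySem.Dict.empty)
  (PySem.List.pyRange 0 clusterNum 1).map (fun k => st.2.getD k [])

-- ===== PRECONDITION & SPEC =====
-- closed form for 'the entries A appends': start with 'org.aion.' and have an uppercase
-- letter at some position i with a '.' at some later position j
def pvQual (v : String) : Prop :=
  PySem.Str.startswith v "org.aion." = true ∧
  ∃ i < v.toList.length, ∃ j < v.toList.length,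
    i < j ∧ 'A' ≤ v.toList[i]! ∧ v.toList[i]! ≤ 'Z' ∧ v.toList[j]! = '.'

-- Pre_ excludes exactly the inputs where A raises IndexError: every qualifying entry must fall at a
-- Python-valid index of the clusterNum-long result (markers seen so far = 0 needs clusterNum ≥ 1 for the
-- -1 wraparound; markers = c > 0 needs c ≤ clusterNum).
def Pre_generateTheGroundTruth (variable_ : List String) (clusterNum : Int) : Prop :=
  ∀ p : Nat, (h : p < variable_.length) → pvQual variable_[p] →
    (if (variable_.take (p+1)).countP (· == "module-info") = 0 then 1 ≤ clusterNum
     else ((variable_.take (p+1)).countP (· == "module-info") : Int) ≤ clusterNum)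
instance (variable_ : List String) (clusterNum : Int) : Decidable (Pre_generateTheGroundTruth variable_ clusterNum) := by
  unfold Pre_generateTheGroundTruth pvQual; infer_instance

def pvWitness_generateTheGroundTruth : List String × Int :=
  (["module-info", "org.aion.Base.java", "x"], 1)

-- On inputs with clusterNum ≥ 1 where some qualifying org.aion entry occurs before the first
-- 'module-info' marker, A appends that entry to the LAST group via Python's accidental -1
-- negative-index wraparound, while B drops entries that precede any marker, which is the intended
-- grouping (an entry before any module belongs to no module).
def D_generateTheGroundTruth (variable_ : List String) (clusterNum : Int) : Prop :=
  1 ≤ clusterNum ∧ ∃ p < variable_.length, pvQual variable_[p]! ∧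
    (variable_.take (p+1)).countP (· == "module-info") = 0
instance (variable_ : List String) (clusterNum : Int) : Decidable (D_generateTheGroundTruth variable_ clusterNum) := by
  unfold D_generateTheGroundTruth pvQual; infer_instance

def Spec_generateTheGroundTruth (variable_ : List String) (clusterNum : Int) (out : List (List String)) : Prop :=
  ¬ D_generateTheGroundTruth variable_ clusterNum → out = generateTheGroundTruth_alt variable_ clusterNum
instance (variable_ : List String) (clusterNum : Int) (out : List (List String)) : Decidable (Spec_generateTheGroundTruth variable_ clusterNum out) := by
  unfold Spec_generateTheGroundTruth; infer_instance

def pvDiffWitness_generateTheGroundTruth : List String × Int := (["org.aion.B.x"], 1)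
def pvDiffWitnessOut_generateTheGroundTruth : (List (List String)) × (List (List String)) :=
  ([["org.aion.B.x"]], [[]])

-- ===== CLAIM (what is proved, stated in full; the proofs are below) =====
def Claim_unchanged_generateTheGroundTruth : Prop := ∀ (variable_ : List String) (clusterNum : Int), Dom_generateTheGroundTruth variable_ clusterNum → Pre_generateTheGroundTruth variable_ clusterNum → Spec_generateTheGroundTruth variable_ clusterNum (generateTheGroundTruth variable_ clusterNum)
def Claim_changed_generateTheGroundTruth : Prop := Dom_generateTheGroundTruth (pvDiffWitness_generateTheGroundTruth.1) (pvDiffWitness_generateTheGroundTruth.2) ∧ Pre_generateTheGroundTruth (pvDiffWitness_generateTheGroundTruth.1) (pvDiffWitness_generateTheGroundTruth.2) ∧ D_generateTheGroundTruth (pvDiffWitness_generateTheGroundTruth.1) (pvDiffWitness_generateTheGroundTruth.2) ∧ generateTheGroundTruth (pvDiffWitness_generateTheGroundTruth.1) (pvDiffWitness_generateTheGroundTruth.2) = pvDiffWitnessOut_generateTheGroundTruth.1 ∧ generateTheGroundTruth_alt (pvDiffWitness_generateTheGroundTruth.1) (pvDiffWitness_generateTheGroundTruth.2) = pvDiffWitnessOut_generateTheGroundTruth.2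 ∧ pvDiffWitnessOut_generateTheGroundTruth.1 ≠ pvDiffWitnessOut_generateTheGroundTruth.2
def Claim_exact_generateTheGroundTruth : Prop := ∀ (variable_ : List String) (clusterNum : Int), Dom_generateTheGroundTruth variable_ clusterNum → Pre_generateTheGroundTruth variable_ clusterNum → D_generateTheGroundTruth variable_ clusterNum → generateTheGroundTruth variable_ clusterNum ≠ generateTheGroundTruth_alt variable_ clusterNum

-- ===== LEMMAS AND PROOFS =====

-- proof-side executable form of pvQual
def upperBeforeDot : List Char → Bool
  | [] => false
  | c :: rest => (('A' ≤ c && c ≤ 'Z') && rest.contains '.') || upperBeforeDot rest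

def bQual (v : String) : Bool := PySem.Str.startswith v "org.aion." && upperBeforeDot v.toList

-- proof-side characterisation of A: the same bucketing fold WITHOUT B's marks>0 guard …
def specStep (st : Int × PySem.Dict Int (List String)) (v : String) : Int × PySem.Dict Int (List String) :=
  let marks := if v = "module-info" then st.1 + 1 else st.1
  let buckets :=
    if PySem.Str.startswith v "org.aion." && isJavaFile v then
      st.2.modify (marks - 1) [] (· ++ [v])
    else st.2
  (marks, buckets)

-- … rendered with bucket -1 merged into the last slot (A's -1 wraparound)
def renderOld (cN : Int) (d : PySem.Dict Int (List String)) : List (List String) :=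
  (PySem.List.pyRange 0 cN 1).map (fun k =>
    (if k = cN - 1 then d.getD (-1) [] else []) ++ d.getD k [])

lemma upperBeforeDot_iff (cs : List Char) :
    upperBeforeDot cs = true ↔
      ∃ i < cs.length, ∃ j < cs.length, i < j ∧ 'A' ≤ cs[i]! ∧ cs[i]! ≤ 'Z' ∧ cs[j]! = '.' := by
  induction cs with
  | nil => simp [upperBeforeDot]
  | cons c rest ih =>
    rw [upperBeforeDot]
    simp only [Bool.or_eq_true, Bool.and_eq_true, decide_eq_true_eq, ih]
    constructor
    · rintro (⟨⟨h1, h2⟩, h3⟩ | ⟨i, hi, j, hj, hij, hu1, hu2, hd⟩)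
      · have hm : '.' ∈ rest := by simpa using h3
        obtain ⟨k, hk, hke⟩ := List.mem_iff_getElem.mp hm
        refine ⟨0, by simp, k + 1, by simp only [List.length_cons]; omega, by omega, ?_, ?_, ?_⟩
        · rw [getElem!_pos (c :: rest) 0 (by simp)]; simpa using h1
        · rw [getElem!_pos (c :: rest) 0 (by simp)]; simpa using h2
        · rw [getElem!_pos (c :: rest) (k + 1) (by simp only [List.length_cons]; omega)]
          simpa using hke
      · refine ⟨i + 1, by simp only [List.length_cons]; omega,
          j + 1, by simp only [List.length_cons]; omega, by omega, ?_, ?_, ?_⟩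
        · rw [getElem!_pos (c :: rest) (i + 1) (by simp only [List.length_cons]; omega),
            List.getElem_cons_succ]
          rwa [getElem!_pos rest i hi] at hu1
        · rw [getElem!_pos (c :: rest) (i + 1) (by simp only [List.length_cons]; omega),
            List.getElem_cons_succ]
          rwa [getElem!_pos rest i hi] at hu2
        · rw [getElem!_pos (c :: rest) (j + 1) (by simp only [List.length_cons]; omega),
            List.getElem_cons_succ]
          rwa [getElem!_pos rest j hj] at hd
    · rintro ⟨i, hi, j, hj, hij, hu1, hu2, hd⟩
      match i, hij with
      | 0, _ =>
        left
        obtain ⟨j', rfl⟩ : ∃ j', j = j' + 1 := ⟨j - 1, by omega⟩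
        have hjr : j' < rest.length := by simp only [List.length_cons] at hj; omega
        rw [getElem!_pos (c :: rest) 0 (by simp)] at hu1 hu2
        rw [getElem!_pos (c :: rest) (j' + 1) (by simp only [List.length_cons]; omega),
          List.getElem_cons_succ] at hd
        refine ⟨⟨by simpa using hu1, by simpa using hu2⟩, ?_⟩
        have hmem : '.' ∈ rest := by rw [← hd]; exact List.getElem_mem hjr
        simpa using hmem
      | Nat.succ i', _ =>
        right
        obtain ⟨j', rfl⟩ : ∃ j', j = j' + 1 := ⟨j - 1, by omega⟩
        have hjr : j' < rest.length := by simp only [List.length_cons] at hj; omega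
        have hir : i' < rest.length := by simp only [List.length_cons] at hi; omega
        refine ⟨i', hir, j', hjr, by omega, ?_, ?_, ?_⟩
        · rw [getElem!_pos (c :: rest) (i' + 1) (by simp only [List.length_cons]; omega),
            List.getElem_cons_succ] at hu1
          rwa [getElem!_pos rest i' hir]
        · rw [getElem!_pos (c :: rest) (i' + 1) (by simp only [List.length_cons]; omega),
            List.getElem_cons_succ] at hu2
          rwa [getElem!_pos rest i' hir]
        · rw [getElem!_pos (c :: rest) (j' + 1) (by simp only [List.length_cons]; omega),
            List.getElem_cons_succ] at hd
          rwa [getElem!_pos rest j' hjr]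

lemma pvQual_iff (v : String) : pvQual v ↔ bQual v = true := by
  unfold pvQual bQual
  rw [Bool.and_eq_true, upperBeforeDot_iff]

lemma judgeInnerLoop_eq (cs : List Char) (i : Nat) (h : Bool) :
    judgeInnerLoop cs i h = (h || (cs.drop i).contains '.') := by
  induction i using judgeInnerLoop.induct cs with
  | case1 i hlt hdot =>
    rw [judgeInnerLoop]
    simp [hlt, hdot, List.drop_eq_getElem_cons hlt]
  | case2 i hlt hdot ih =>
    rw [judgeInnerLoop]
    simp only [hlt, dif_pos, if_neg hdot, ih]
    rw [List.drop_eq_getElem_cons hlt, List.contains_cons]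
    simp only [beq_eq_false_iff_ne.mpr (fun hh => hdot hh.symm), Bool.false_or]
  | case3 i hge =>
    rw [judgeInnerLoop]
    simp [hge, List.drop_eq_nil_of_le (Nat.le_of_not_lt hge)]

lemma judgeOuterLoop_eq (cs : List Char) (i : Nat) (h : Bool) :
    judgeOuterLoop cs i h = (h || upperBeforeDot (cs.drop i)) := by
  induction i, h using judgeOuterLoop.induct cs with
  | case1 i h hlt ih =>
    rw [judgeOuterLoop]
    simp only [hlt, dif_pos]
    simp only [dite_eq_ite] at ih
    rw [ih, List.drop_eq_getElem_cons hlt, upperBeforeDot]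
    by_cases hu : ('A' ≤ cs[i] && cs[i] ≤ 'Z') = true
    · rw [if_pos hu, judgeInnerLoop_eq, hu]
      cases h <;> simp [Bool.or_comm]
    · rw [if_neg hu, Bool.eq_false_iff.mpr hu]
      simp
  | case2 i h hge =>
    rw [judgeOuterLoop]
    simp [hge, List.drop_eq_nil_of_le (Nat.le_of_not_lt hge), upperBeforeDot]

lemma JudgeToFile_eq (v : String) : JudgeToFile v = upperBeforeDot v.toList := by
  rw [JudgeToFile, judgeOuterLoop_eq]; simp

lemma isJavaFileLoop_eq (cs : List Char) (seen : Bool) :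
    isJavaFileLoop cs seen = ((seen && cs.contains '.') || upperBeforeDot cs) := by
  induction cs generalizing seen with
  | nil => simp [isJavaFileLoop, upperBeforeDot]
  | cons c rest ih =>
    rw [isJavaFileLoop, upperBeforeDot, List.contains_cons]
    cases seen with
    | false =>
      rw [if_neg (by simp), ih]
      cases hu : ('A' ≤ c && c ≤ 'Z') <;> simp
    | true =>
      by_cases hc : c = '.'
      · simp [hc]
      · rw [if_neg (by simp [hc]), ih]
        have hdc : ('.' == c) = false := beq_eq_false_iff_ne.mpr (fun hh => hc hh.symm)
        cases hu : ('A' ≤ c && c ≤ 'Z') <;>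
          simp [hdc, Bool.or_comm, Bool.or_left_comm]

lemma isJavaFile_eq (v : String) : isJavaFile v = upperBeforeDot v.toList := by
  rw [isJavaFile, isJavaFileLoop_eq]; simp

-- Pre_ restated structurally along the loop, with m markers already seen
def PreS (cN : Int) : List String → Int → Prop
  | [], _ => True
  | v :: rest, m =>
    (bQual v = true →
      (if (if v = "module-info" then m + 1 else m) = 0 then 1 ≤ cN
       else (if v = "module-info" then m + 1 else m) ≤ cN)) ∧
    PreS cN rest (if v = "module-info" then m + 1 else m)

lemma pySetD_neg_one_set {α : Type} (xs : List α) (h : xs ≠ []) (v : α) :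
    PySem.List.pySetD xs (-1) v = xs.set (xs.length - 1) v := by
  have hlen : 0 < xs.length := List.length_pos_iff.mpr h
  unfold PySem.List.pySetD PySem.List.pySet? PySem.List.pyIdx?
  rw [if_neg (by omega), if_pos (by omega)]
  simp

lemma renderOld_length (cN : Int) (d : PySem.Dict Int (List String)) :
    (renderOld cN d).length = cN.toNat := by
  simp [renderOld, PySem.List.length_pyRange_one]

lemma renderOld_getElem (cN : Int) (d : PySem.Dict Int (List String)) (j : Nat)
    (hj : j < (renderOld cN d).length) :
    (renderOld cN d)[j] = (if (j : Int) = cN - 1 then d.getD (-1) [] else []) ++ d.getD (j : Int) [] := by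
  simp [renderOld, PySem.List.pyRange_one]

lemma pre_to_preS (cN : Int) (l : List String) : ∀ (m : Nat),
    (∀ p : Nat, (h : p < l.length) → bQual l[p] = true →
      (if (m + (l.take (p+1)).countP (· == "module-info")) = 0 then 1 ≤ cN
       else ((m + (l.take (p+1)).countP (· == "module-info") : Nat) : Int) ≤ cN)) →
    PreS cN l (m : Int) := by
  induction l with
  | nil => intro m _; trivial
  | cons v rest ih =>
    intro m hp
    refine ⟨?_, ?_⟩
    · intro hq
      have h0 := hp 0 (by simp) (by simpa using hq)
      simp only [List.take_succ_cons, List.take_zero, List.countP_cons, List.countP_nil,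
        Nat.zero_add, beq_iff_eq] at h0
      by_cases hv : v = "module-info"
      · simp only [hv, if_true] at h0 ⊢
        rw [if_neg (by omega)] at h0
        rw [if_neg (by omega)]
        push_cast at h0
        exact h0
      · simp only [hv, if_false, Nat.add_zero] at h0 ⊢
        by_cases hm : m = 0
        · subst hm; simpa using h0
        · rw [if_neg hm] at h0
          rw [if_neg (fun hh => hm (by exact_mod_cast hh))]
          exact h0
    · have hrec := ih (if v = "module-info" then m + 1 else m) (fun p h hq => by
        have h1 := hp (p + 1) (by simp only [List.length_cons]; omega) (by simpa using hq)
        simp only [List.take_succ_cons, List.countP_cons, beq_iff_eq] at h1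
        by_cases hv : v = "module-info"
        · simp only [hv, if_true] at h1 ⊢
          have he : (m + 1) + List.countP (fun x => x == "module-info") (List.take (p+1) rest)
              = m + (List.countP (fun x => x == "module-info") (List.take (p+1) rest) + 1) := by
            omega
          rw [he]; exact h1
        · simp only [hv, if_false, Nat.add_zero] at h1 ⊢
          exact h1)
      by_cases hv : v = "module-info"
      · simp only [hv, if_true] at hrec ⊢
        exact_mod_cast hrec
      · simp only [hv, if_false] at hrec ⊢
        exact hrec

lemma renderOld_empty (cN : Int) :
    renderOld cN PySem.Dict.empty = List.replicate cN.toNat [] := by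
  apply List.ext_getElem
  · simp [renderOld_length]
  · intro j hj hj'
    rw [renderOld_getElem]
    simp [PySem.Dict.getD_empty]

lemma append_step (cN : Int) (d : PySem.Dict Int (List String)) (m : Int) (v : String)
    (hm : 0 ≤ m)
    (hcond : if m = 0 then 1 ≤ cN else m ≤ cN)
    (hemp : ∀ k : Int, m ≤ k → d.getD k [] = []) :
    PySem.List.pySetD (renderOld cN d) (m - 1)
        (PySem.List.pyGetD (renderOld cN d) (m - 1) [] ++ [v])
      = renderOld cN (d.modify (m - 1) [] (· ++ [v])) := by
  have hlen := renderOld_length cN d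
  by_cases hm0 : m = 0
  · subst hm0
    rw [if_pos rfl] at hcond
    have hn : 0 < cN.toNat := by omega
    have hne : renderOld cN d ≠ [] := by
      intro hh
      rw [hh] at hlen
      simp at hlen
      omega
    rw [show (0:Int) - 1 = -1 by ring, PySem.List.pyGetD_neg_one _ _ hne,
      pySetD_neg_one_set _ hne, List.getLast_eq_getElem]
    apply List.ext_getElem
    · simp [renderOld_length]
    · intro j hj hj'
      rw [List.getElem_set]
      simp only [renderOld_getElem, PySem.Dict.getD_modify]
      by_cases hje : (renderOld cN d).length - 1 = j
      · have hji : (j : Int) = cN - 1 := by omega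
        have hji' : ¬ (j : Int) = -1 := by omega
        have hd2 : d.getD ((j : Nat) : Int) [] = [] := hemp _ (by omega)
        rw [if_pos hje, hje]
        have hd2' : d.getD (cN - 1) [] = [] := by rw [← hji]; exact hd2
        have hc0 : ¬ cN = 0 := by omega
        simp [hji, hd2', hc0]
      · rw [if_neg hje]
        have hji : ¬ (j : Int) = cN - 1 := by omega
        have hji' : ¬ (j : Int) = -1 := by omega
        rw [if_neg hji, if_neg hji, if_neg hji']
  · rw [if_neg hm0] at hcond
    have hm1 : 1 ≤ m := by omega
    have hml : m - 1 < ((renderOld cN d).length : Int) := by rw [hlen]; omega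
    rw [PySem.List.pyGetD_eq_getElem (renderOld cN d) [] (by omega) hml,
      PySem.List.pySetD_of_nonneg (renderOld cN d) _ (by omega)]
    apply List.ext_getElem
    · simp [renderOld_length]
    · intro j hj hj'
      rw [List.getElem_set]
      simp only [renderOld_getElem, PySem.Dict.getD_modify]
      by_cases hje : (m - 1).toNat = j
      · rw [if_pos hje]
        have hji : ((((m - 1).toNat) : Nat) : Int) = m - 1 := by omega
        have hjm : (j : Int) = m - 1 := by omega
        rw [if_pos hjm, if_neg (by omega : ¬ (-1 : Int) = m - 1), hji]
        by_cases hc : ((m - 1 : Int) = cN - 1)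
        · rw [if_pos hc, if_pos (by omega : (j : Int) = cN - 1), List.append_assoc]
        · rw [if_neg hc, if_neg (by omega : ¬ (j : Int) = cN - 1)]
          simp
      · rw [if_neg hje]
        rw [if_neg (by omega : ¬ ((j : Nat) : Int) = m - 1),
          if_neg (by omega : ¬ (-1 : Int) = m - 1)]

lemma step_eq (cN : Int) (m : Int) (d : PySem.Dict Int (List String)) (v : String)
    (hm : 0 ≤ m)
    (hemp : ∀ k : Int, m ≤ k → d.getD k [] = [])
    (hcond : bQual v = true →
      (if (if v = "module-info" then m + 1 else m) = 0 then 1 ≤ cN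
       else (if v = "module-info" then m + 1 else m) ≤ cN)) :
    mainStepA (renderOld cN d, m - 1) v
      = (renderOld cN (specStep (m, d) v).2, (specStep (m, d) v).1 - 1) := by
  have hgA : (PySem.Str.startswith v "org.aion." && JudgeToFile v) = bQual v := by
    rw [JudgeToFile_eq]; rfl
  have hgB : (PySem.Str.startswith v "org.aion." && isJavaFile v) = bQual v := by
    rw [isJavaFile_eq]; rfl
  have hle : m ≤ (if v = "module-info" then m + 1 else m) := by split <;> omega
  have hm'0 : 0 ≤ (if v = "module-info" then m + 1 else m) := le_trans hm hle
  have hemp' : ∀ k : Int, (if v = "module-info" then m + 1 else m) ≤ k → d.getD k [] = [] :=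
    fun k hk => hemp k (le_trans hle hk)
  have hidx : (if v = "module-info" then (m - 1) + 1 else m - 1)
      = (if v = "module-info" then m + 1 else m) - 1 := by split <;> ring
  simp only [mainStepA, specStep, hgA, hgB, hidx]
  cases hq : bQual v
  · simp
  · simp only [if_true]
    rw [append_step cN d _ v hm'0 (hcond hq) hemp']

lemma fold_eq (cN : Int) (l : List String) : ∀ (m : Int) (d : PySem.Dict Int (List String)),
    0 ≤ m →
    (∀ k : Int, m ≤ k → d.getD k [] = []) →
    PreS cN l m →
    (l.foldl mainStepA (renderOld cN d, m - 1)).1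
      = renderOld cN (l.foldl specStep (m, d)).2 := by
  induction l with
  | nil => intro m d _ _ _; rfl
  | cons v rest ih =>
    intro m d hm hemp hpre
    obtain ⟨hhead, htail⟩ := hpre
    simp only [List.foldl_cons]
    rw [step_eq cN m d v hm hemp hhead]
    have hfst : (specStep (m, d) v).1 = (if v = "module-info" then m + 1 else m) := by
      simp [specStep]
    have hle : m ≤ (if v = "module-info" then m + 1 else m) := by split <;> omega
    have hemp' : ∀ k : Int, (specStep (m, d) v).1 ≤ k → ((specStep (m, d) v).2).getD k [] = [] := by
      intro k hk
      rw [hfst] at hk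
      simp only [specStep]
      split
      · rw [PySem.Dict.getD_modify, if_neg (by omega)]
        exact hemp k (le_trans hle hk)
      · exact hemp k (le_trans hle hk)
    have hpre' : PreS cN rest (specStep (m, d) v).1 := by rw [hfst]; exact htail
    exact ih (specStep (m, d) v).1 (specStep (m, d) v).2
      (by rw [hfst]; exact le_trans hm hle) hemp' hpre'

-- A, characterised at the dict level: under Pre_, A = renderOld of the unguarded bucketing fold
lemma A_char (variable_ : List String) (clusterNum : Int)
    (hpre : Pre_generateTheGroundTruth variable_ clusterNum) :
    generateTheGroundTruth variable_ clusterNum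
      = renderOld clusterNum (variable_.foldl specStep ((0 : Int), PySem.Dict.empty)).2 := by
  have hps : PreS clusterNum variable_ ((0 : Nat) : Int) :=
    pre_to_preS clusterNum variable_ 0 (fun p h hq => by
      simpa using hpre p h ((pvQual_iff _).mpr hq))
  have h0 := fold_eq clusterNum variable_ 0 PySem.Dict.empty le_rfl
    (fun k _ => by simp [PySem.Dict.getD_empty]) (by simpa using hps)
  rw [show (0 : Int) - 1 = -1 by ring, renderOld_empty] at h0
  unfold generateTheGroundTruth
  exact h0


lemma specStep_def (m : Int) (d : PySem.Dict Int (List String)) (v : String) :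
    specStep (m, d) v
      = ((if v = "module-info" then m + 1 else m),
         if PySem.Str.startswith v "org.aion." && isJavaFile v then
           d.modify ((if v = "module-info" then m + 1 else m) - 1) [] (· ++ [v])
         else d) := rfl

lemma mainStepB_def (m : Int) (d : PySem.Dict Int (List String)) (v : String) :
    mainStepB (m, d) v
      = ((if v = "module-info" then m + 1 else m),
         if decide (0 < (if v = "module-info" then m + 1 else m)) &&
            PySem.Str.startswith v "org.aion." && isJavaFile v then
           d.modify ((if v = "module-info" then m + 1 else m) - 1) [] (· ++ [v])
         else d) := rfl

-- B's guarded fold agrees with the unguarded one on all nonnegative keys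
lemma dict_agree (l : List String) : ∀ (m : Int) (dN dO : PySem.Dict Int (List String)),
    (∀ k : Int, 0 ≤ k → dN.getD k [] = dO.getD k []) →
    (l.foldl mainStepB (m, dN)).1 = (l.foldl specStep (m, dO)).1 ∧
      (∀ k : Int, 0 ≤ k →
        ((l.foldl mainStepB (m, dN)).2).getD k [] = ((l.foldl specStep (m, dO)).2).getD k []) := by
  induction l with
  | nil => intro m dN dO h; exact ⟨rfl, h⟩
  | cons v rest ih =>
    intro m dN dO h
    simp only [List.foldl_cons, mainStepB_def, specStep_def, Bool.and_assoc]
    apply ih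
    intro k hk
    set m' : Int := if v = "module-info" then m + 1 else m with hm'
    cases hg : (PySem.Str.startswith v "org.aion." && isJavaFile v) with
    | false =>
      rw [if_neg (by simp), if_neg (by simp)]
      exact h k hk
    | true =>
      rw [if_pos rfl]
      by_cases hp : 0 < m'
      · rw [if_pos (by simp [hp]), PySem.Dict.getD_modify, PySem.Dict.getD_modify]
        by_cases hke : k = m' - 1
        · rw [if_pos hke, if_pos hke, h (m' - 1) (by omega)]
        · rw [if_neg hke, if_neg hke]; exact h k hk
      · rw [if_neg (by simp [hp]), PySem.Dict.getD_modify, if_neg (by omega : ¬ k = m' - 1)]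
        exact h k hk

-- B, characterised at the dict level: B reads the nonnegative buckets of the unguarded fold
lemma B_char (variable_ : List String) (clusterNum : Int) :
    generateTheGroundTruth_alt variable_ clusterNum
      = (PySem.List.pyRange 0 clusterNum 1).map
          (fun k => ((variable_.foldl specStep ((0 : Int), PySem.Dict.empty)).2).getD k []) := by
  unfold generateTheGroundTruth_alt
  have h := (dict_agree variable_ 0 PySem.Dict.empty PySem.Dict.empty (fun _ _ => rfl)).2
  apply List.map_congr_left
  intro k hk
  have hk0 : 0 ≤ k := by
    rw [PySem.List.mem_pyRange_one] at hk
    exact hk.1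
  exact h k hk0

-- once m ≥ 1 the unguarded fold never touches bucket -1
lemma noNeg_pos (l : List String) : ∀ (m : Int) (d : PySem.Dict Int (List String)), 1 ≤ m →
    ((l.foldl specStep (m, d)).2).getD (-1) [] = d.getD (-1) [] := by
  induction l with
  | nil => intro m d _; rfl
  | cons v rest ih =>
    intro m d hm
    simp only [List.foldl_cons, specStep_def]
    set m' : Int := if v = "module-info" then m + 1 else m with hm'
    have hm'1 : 1 ≤ m' := by rw [hm']; split <;> omega
    rw [ih m' _ hm'1]
    by_cases hg : (PySem.Str.startswith v "org.aion." && isJavaFile v) = true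
    · rw [if_pos hg, PySem.Dict.getD_modify, if_neg (by omega : ¬ (-1 : Int) = m' - 1)]
    · rw [if_neg hg]

lemma bQual_ne_marker (v : String) (hq : bQual v = true) : v ≠ "module-info" := by
  intro hv
  rw [hv] at hq
  exact absurd hq (by decide)

-- with no qualifying entry before the first marker, bucket -1 stays empty
lemma noNeg_zero (l : List String) : ∀ (d : PySem.Dict Int (List String)),
    (∀ p : Nat, (h : p < l.length) → bQual l[p] = true →
      (l.take (p+1)).countP (· == "module-info") ≠ 0) →
    ((l.foldl specStep ((0 : Int), d)).2).getD (-1) [] = d.getD (-1) [] := by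
  induction l with
  | nil => intro d _; rfl
  | cons v rest ih =>
    intro d hyp
    simp only [List.foldl_cons, specStep_def]
    by_cases hv : v = "module-info"
    · subst hv
      rw [if_pos rfl, if_neg (by decide)]
      exact noNeg_pos rest (0+1) d (by omega)
    · by_cases hq : bQual v = true
      · exfalso
        have := hyp 0 (by simp) (by simpa using hq)
        simp [hv] at this
      · have hg : (PySem.Str.startswith v "org.aion." && isJavaFile v) = false := by
          rw [show (PySem.Str.startswith v "org.aion." && isJavaFile v) = bQual v by
            rw [isJavaFile_eq]; rfl]
          exact Bool.eq_false_iff.mpr hq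
        rw [if_neg hv, if_neg (by rw [hg]; simp)]
        apply ih
        intro p h hq'
        have := hyp (p+1) (by simp only [List.length_cons]; omega) (by simpa using hq')
        simp only [List.take_succ_cons, List.countP_cons, beq_iff_eq, if_neg hv] at this
        simpa using this

-- appends never empty a bucket: bucket -1 stays nonempty along the fold
lemma negPersist (l : List String) : ∀ (m : Int) (d : PySem.Dict Int (List String)),
    d.getD (-1) [] ≠ [] → ((l.foldl specStep (m, d)).2).getD (-1) [] ≠ [] := by
  induction l with
  | nil => intro m d h; exact h
  | cons v rest ih =>
    intro m d h
    simp only [List.foldl_cons, specStep_def]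
    apply ih
    by_cases hg : (PySem.Str.startswith v "org.aion." && isJavaFile v) = true
    · rw [if_pos hg, PySem.Dict.getD_modify]
      by_cases hke : (-1 : Int) = (if v = "module-info" then m + 1 else m) - 1
      · rw [if_pos hke, ← hke]
        intro hh
        exact h (List.append_eq_nil_iff.mp hh).1
      · rw [if_neg hke]; exact h
    · rw [if_neg hg]; exact h

-- a qualifying entry before the first marker puts something into bucket -1
lemma negNonempty (l : List String) : ∀ (d : PySem.Dict Int (List String)),
    (∃ p, ∃ _ : p < l.length, bQual l[p]! = true ∧
      (l.take (p+1)).countP (· == "module-info") = 0) →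
    ((l.foldl specStep ((0 : Int), d)).2).getD (-1) [] ≠ [] := by
  induction l with
  | nil => rintro d ⟨p, hp, _⟩; exact absurd hp (by simp)
  | cons v rest ih =>
    rintro d ⟨p, hp, hq, hc⟩
    simp only [List.foldl_cons, specStep_def]
    match p with
    | 0 =>
      rw [getElem!_pos (v :: rest) 0 (by simp)] at hq
      simp only [List.getElem_cons_zero] at hq
      have hv : v ≠ "module-info" := bQual_ne_marker v hq
      have hg : (PySem.Str.startswith v "org.aion." && isJavaFile v) = true := by
        rw [show (PySem.Str.startswith v "org.aion." && isJavaFile v) = bQual v by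
          rw [isJavaFile_eq]; rfl]
        exact hq
      rw [if_neg hv, if_pos hg]
      apply negPersist
      rw [PySem.Dict.getD_modify, if_pos (by norm_num)]
      simp
    | p' + 1 =>
      simp only [List.take_succ_cons, List.countP_cons, beq_iff_eq] at hc
      have hv : v ≠ "module-info" := by
        intro hv; rw [if_pos hv] at hc; omega
      rw [getElem!_pos (v :: rest) (p' + 1) hp, List.getElem_cons_succ] at hq
      have hp' : p' < rest.length := by simp only [List.length_cons] at hp; omega
      have hc' : (rest.take (p'+1)).countP (· == "module-info") = 0 := by
        rw [if_neg hv] at hc; omega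
      have hq' : bQual rest[p']! = true := by rwa [getElem!_pos rest p' hp']
      rw [if_neg hv]
      exact ih _ ⟨p', hp', hq', hc'⟩

-- ===== VERDICT (by name: the statement is the Claim_ definition above) =====
theorem generateTheGroundTruth_spec : Claim_unchanged_generateTheGroundTruth := by
  intro var cN _ hpre
  unfold Spec_generateTheGroundTruth
  intro hnD
  rw [A_char var cN hpre, B_char var cN, renderOld]
  apply List.map_congr_left
  intro k hk
  rw [PySem.List.mem_pyRange_one] at hk
  by_cases hke : k = cN - 1
  · rw [if_pos hke]
    have hcN : 1 ≤ cN := by omega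
    have hnE : ¬ ∃ p < var.length, pvQual var[p]! ∧
        (var.take (p+1)).countP (· == "module-info") = 0 := by
      intro hE
      exact hnD ⟨hcN, hE⟩
    have hz : ((var.foldl specStep ((0 : Int), PySem.Dict.empty)).2).getD (-1) [] = [] := by
      rw [noNeg_zero var PySem.Dict.empty, PySem.Dict.getD_empty]
      intro p h hq hc
      exact hnE ⟨p, h, by
        rw [getElem!_pos var p h]
        exact (pvQual_iff _).mpr hq, hc⟩
    rw [hz, List.nil_append]
  · rw [if_neg hke, List.nil_append]

theorem generateTheGroundTruth_changed : Claim_changed_generateTheGroundTruth := by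
  unfold Claim_changed_generateTheGroundTruth
  refine ⟨by decide, by decide, by decide, ?_, by decide, by decide⟩
  have hJ : JudgeToFile "org.aion.B.x" = true := by
    rw [JudgeToFile_eq]; decide
  show generateTheGroundTruth ["org.aion.B.x"] 1 = [["org.aion.B.x"]]
  unfold generateTheGroundTruth
  simp only [List.foldl_cons, List.foldl_nil, mainStepA, hJ]
  decide

theorem generateTheGroundTruth_tight : Claim_exact_generateTheGroundTruth := by
  intro var cN _ hpre hD heq
  obtain ⟨hcN, hE⟩ := hD
  rw [A_char var cN hpre, B_char var cN] at heq
  have hEb : ∃ p, ∃ _ : p < var.length, bQual var[p]! = true ∧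
      (var.take (p+1)).countP (· == "module-info") = 0 := by
    obtain ⟨p, hp, hq, hc⟩ := hE
    refine ⟨p, hp, ?_, hc⟩
    rw [getElem!_pos var p hp] at hq ⊢
    exact (pvQual_iff _).mp hq
  have hne : ((var.foldl specStep ((0 : Int), PySem.Dict.empty)).2).getD (-1) [] ≠ [] :=
    negNonempty var PySem.Dict.empty hEb
  have hmem : (cN - 1) ∈ PySem.List.pyRange 0 cN 1 := by
    rw [PySem.List.mem_pyRange_one]; omega
  rw [renderOld] at heq
  have := List.map_inj_left.mp heq (cN - 1) hmem
  rw [if_pos rfl] at this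
  have hlen := congrArg List.length this
  rw [List.length_append] at hlen
  exact hne (List.eq_nil_of_length_eq_zero (by omega))
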